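-- pv_equiv track=rewrite | github.com/BoB14th-SLiMe/ML-DL | operator/ML_DL_pipe/attack_data/test.py | _auto_find_flat_keys
-- ===== SOURCE A (Python) =====
-- from typing import Any, Dict, Optional, Tuple
--
-- Json = Dict[str, Any]
--
-- def _auto_find_flat_keys(obj: Json) -> Tuple[Optional[str], Optional[str]]:
--     keys = list(obj.keys())
--     addr_candidates = [k for k in keys if "translated_addr" in k]
--     val_candidates = [k for k in keys if "word_value" in k]
--     if not addr_candidates or not val_candidates:
--         return None, None
--
--     def _score(k: str) -> Tuple[int, int, int]:
--         return (
--             1 if "xgt_fen" in k else 0,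
--             1 if k.startswith("xgt_fen.") else 0,
--             len(k),  # 약간 더 구체적인 키를 우선
--         )
--
--     addr_candidates.sort(key=_score, reverse=True)
--     val_candidates.sort(key=_score, reverse=True)
--     return addr_candidates[0], val_candidates[0]
-- ===== SOURCE B (Python) =====
-- from typing import Any, Dict, Optional, Tuple
--
-- Json = Dict[str, Any]
--
-- def _auto_find_flat_keys(obj: Json) -> Tuple[Optional[str], Optional[str]]:
--     def _score(k: str) -> Tuple[int, int, int]:
--         return (
--             1 if "xgt_fen" in k else 0,
--             1 if k.startswith("xgt_fen.") else 0,
--             len(k),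
--         )
--
--     best_addr: Optional[str] = None
--     best_val: Optional[str] = None
--     for k in obj.keys():
--         if "translated_addr" in k and (best_addr is None or _score(best_addr) < _score(k)):
--             best_addr = k
--         if "word_value" in k and (best_val is None or _score(best_val) < _score(k)):
--             best_val = k
--     if best_addr is None or best_val is None:
--         return None, None
--     return best_addr, best_val
-- ===== Notes on version B (the rewrite author's own statement) =====
-- stated objective: alternative
-- what changed: Replaces building two filtered candidate lists and sorting each descending by score to take the first element with a single pass over the keys that keeps the current best address key and best value key (strict improvement keeps the first maximum, matching the stable sort's tie-break).
import Mathlib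
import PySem

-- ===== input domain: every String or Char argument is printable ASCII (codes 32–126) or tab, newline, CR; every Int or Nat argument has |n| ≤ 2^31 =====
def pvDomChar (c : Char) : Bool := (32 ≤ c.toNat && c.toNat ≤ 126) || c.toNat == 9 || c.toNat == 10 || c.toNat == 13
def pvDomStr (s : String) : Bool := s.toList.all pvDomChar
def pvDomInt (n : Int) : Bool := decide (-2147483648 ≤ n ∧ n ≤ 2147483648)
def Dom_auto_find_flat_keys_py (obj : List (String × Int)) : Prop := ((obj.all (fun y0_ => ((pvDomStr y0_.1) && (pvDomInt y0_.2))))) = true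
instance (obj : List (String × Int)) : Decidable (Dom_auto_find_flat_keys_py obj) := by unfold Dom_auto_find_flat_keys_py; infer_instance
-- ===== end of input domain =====

-- B replaces A's two filtered lists + descending sort + [0] with a single pass over the keys
-- keeping the running best address/value key (same result; alternative algorithm, not claimed faster).


-- ===== PORT A =====
-- _score(k): the Python tuple (int,int,int), compared lexicographically — modelled exactly by Lex.
-- Both Pythons contain this identical helper, so it is shared by the two ports.
def pyScore (k : String) : Lex (Int × Lex (Int × Int)) :=
  toLex ((if PySem.Str.isIn "xgt_fen" k then (1 : Int) else 0),
    toLex ((if PySem.Str.startswith k "xgt_fen." then (1 : Int) else 0), (PySem.Str.len k : Int)))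

-- list(obj.keys()): the dict's keys in insertion order = first-occurrence dedup of the pairs' fsts
def auto_find_flat_keys_py (obj : List (String × Int)) : Option String × Option String :=
  let keys := PySem.List.dedup (obj.map Prod.fst)
  let addr_candidates := keys.filter (fun k => PySem.Str.isIn "translated_addr" k)
  let val_candidates := keys.filter (fun k => PySem.Str.isIn "word_value" k)
  if addr_candidates.isEmpty || val_candidates.isEmpty then (none, none)
  else ((PySem.List.sorted addr_candidates pyScore true).head?,
        (PySem.List.sorted val_candidates pyScore true).head?)

-- ===== PORT B =====
def auto_find_flat_keys_py_alt (obj : List (String × Int)) : Option String × Option String :=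
  let keys := PySem.List.dedup (obj.map Prod.fst)
  let best := keys.foldl (fun s k =>
      ((if PySem.Str.isIn "translated_addr" k &&
            (s.1.elim true (fun m => decide (pyScore m < pyScore k))) then some k else s.1),
       (if PySem.Str.isIn "word_value" k &&
            (s.2.elim true (fun m => decide (pyScore m < pyScore k))) then some k else s.2)))
    ((none : Option String), (none : Option String))
  match best with
  | (some a, some v) => (some a, some v)
  | _ => (none, none)

-- ===== PRECONDITION & SPEC =====
def Spec_auto_find_flat_keys_py (obj : List (String × Int)) (out : Option String × Option String) : Prop := out = auto_find_flat_keys_py_alt obj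
instance (obj : List (String × Int)) (out : Option String × Option String) : Decidable (Spec_auto_find_flat_keys_py obj out) := by unfold Spec_auto_find_flat_keys_py; infer_instance

-- ===== CLAIM (what is proved, stated in full; the proofs are below) =====
def Claim_equal_auto_find_flat_keys_py : Prop := ∀ (obj : List (String × Int)), Dom_auto_find_flat_keys_py obj → Spec_auto_find_flat_keys_py obj (auto_find_flat_keys_py obj)

-- ===== LEMMAS AND PROOFS =====

-- max?-style running-best step (Option.elim form, shared by all proof lemmas)
def mstep (o : Option String) (x : String) : Option String :=
  o.elim (some x) (fun m => if pyScore m < pyScore x then some x else some m)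

lemma head_insertBy (x : String) (acc : List String) :
    (PySem.List.insertBy (fun a b => decide (pyScore b < pyScore a)) x acc).head? =
      mstep acc.head? x := by
  cases acc with
  | nil => simp [PySem.List.insertBy, mstep]
  | cons y ys => by_cases h : pyScore y < pyScore x <;> simp [PySem.List.insertBy, mstep, h]

lemma foldl_ins_head (xs : List String) (acc : List String) :
    (xs.foldl (fun a x => PySem.List.insertBy (fun a b => decide (pyScore b < pyScore a)) x a) acc).head? =
      xs.foldl mstep acc.head? := by
  induction xs generalizing acc with
  | nil => rfl
  | cons x t ih => simp only [List.foldl_cons, ih, head_insertBy]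

-- head of the descending stable sort is the running best of the list
lemma head_sorted_rev (xs : List String) :
    (PySem.List.sorted xs pyScore true).head? = xs.foldl mstep none := by
  rw [PySem.List.sorted_rev_eq_foldl_insertBy, foldl_ins_head]
  rfl

-- B's guarded one-pass fold over all keys = running best over the filtered list
lemma bfold (p : String → Bool) (keys : List String) :
    keys.foldl (fun (s : Option String) k =>
        if p k && (s.elim true (fun m => decide (pyScore m < pyScore k))) then some k else s) none =
      (keys.filter p).foldl mstep none := by
  rw [List.foldl_filter]
  congr 1
  funext s k
  cases s <;> by_cases h : p k = true <;> simp [mstep, h]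

-- B's paired fold = the pair of the two sorted-list heads
lemma alt_fold (keys : List String) :
    keys.foldl (fun s k =>
      ((if PySem.Str.isIn "translated_addr" k &&
            (s.1.elim true (fun m => decide (pyScore m < pyScore k))) then some k else s.1),
       (if PySem.Str.isIn "word_value" k &&
            (s.2.elim true (fun m => decide (pyScore m < pyScore k))) then some k else s.2)))
      ((none : Option String), (none : Option String)) =
    ((PySem.List.sorted (keys.filter (fun k => PySem.Str.isIn "translated_addr" k)) pyScore true).head?,
     (PySem.List.sorted (keys.filter (fun k => PySem.Str.isIn "word_value" k)) pyScore true).head?) := by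
  rw [head_sorted_rev, head_sorted_rev, ← bfold, ← bfold]
  exact PySem.List.foldl_prod_mk
    (fun (a : Option String) k =>
      if PySem.Str.isIn "translated_addr" k &&
          (a.elim true (fun m => decide (pyScore m < pyScore k))) then some k else a)
    (fun (a : Option String) k =>
      if PySem.Str.isIn "word_value" k &&
          (a.elim true (fun m => decide (pyScore m < pyScore k))) then some k else a)
    keys none none

-- ===== VERDICT (by name: the statement is the Claim_ definition above) =====
theorem auto_find_flat_keys_py_spec : Claim_equal_auto_find_flat_keys_py := by
  intro obj _
  unfold Spec_auto_find_flat_keys_py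
  simp only [auto_find_flat_keys_py, auto_find_flat_keys_py_alt]
  rw [alt_fold]
  set keys := PySem.List.dedup (obj.map Prod.fst) with hk
  rcases h1 : (PySem.List.sorted (keys.filter (fun k => PySem.Str.isIn "translated_addr" k)) pyScore true).head? with _ | a <;>
    rcases h2 : (PySem.List.sorted (keys.filter (fun k => PySem.Str.isIn "word_value" k)) pyScore true).head? with _ | v
  · have ha := (PySem.List.sorted_eq_nil_iff _ pyScore true).mp (List.head?_eq_none_iff.mp h1)
    rw [ha]
    simp
  · have ha := (PySem.List.sorted_eq_nil_iff _ pyScore true).mp (List.head?_eq_none_iff.mp h1)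
    rw [ha]
    simp
  · have hv := (PySem.List.sorted_eq_nil_iff _ pyScore true).mp (List.head?_eq_none_iff.mp h2)
    rw [hv]
    simp
  · have ha : keys.filter (fun k => PySem.Str.isIn "translated_addr" k) ≠ [] := by
      intro h
      rw [h] at h1
      simp [PySem.List.sorted] at h1
    have hv : keys.filter (fun k => PySem.Str.isIn "word_value" k) ≠ [] := by
      intro h
      rw [h] at h2
      simp [PySem.List.sorted] at h2
    rw [if_neg (by simp only [Bool.or_eq_true, List.isEmpty_iff, not_or]; exact ⟨ha, hv⟩)]
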